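-- pv_equiv track=rewrite | github.com/XianingY/whuse | tools/dev/refresh_ltp_reference_seeds.py | ordered_round_cases
-- ===== SOURCE A (Python) =====
-- def ordered_round_cases(
--     batch_cases: set[str],
--     curated: set[str],
--     blacklist: set[str],
--     undefined: set[str],
--     nighthawk: set[str],
--     starry: set[str],
-- ) -> list[str]:
--     frontier = batch_cases & (undefined | nighthawk | starry) - curated - blacklist
--     both = sorted(case for case in frontier if case in undefined and case in nighthawk)
--     nighthawk_only = sorted(
--         case for case in frontier if case in nighthawk and case not in undefined
--     )
--     undefined_only = sorted(
--         case for case in frontier if case in undefined and case not in nighthawk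
--     )
--     starry_only = sorted(
--         case
--         for case in frontier
--         if case in starry and case not in undefined and case not in nighthawk
--     )
--     return both + nighthawk_only + undefined_only + starry_only
-- ===== SOURCE B (Python) =====
-- def ordered_round_cases(
--     batch_cases: set[str],
--     curated: set[str],
--     blacklist: set[str],
--     undefined: set[str],
--     nighthawk: set[str],
--     starry: set[str],
-- ) -> list[str]:
--     def rank(case):
--         if case in undefined and case in nighthawk:
--             return 0
--         if case in nighthawk:
--             return 1
--         if case in undefined:
--             return 2
--         return 3
--     frontier = batch_cases & (undefined | nighthawk | starry) - curated - blacklist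
--     return sorted(frontier, key=lambda case: (rank(case), case))
-- ===== Notes on version B (the rewrite author's own statement) =====
-- stated objective: alternative
-- what changed: B removes the four category buckets entirely: it assigns each frontier case a numeric category rank and performs ONE sort of the frontier by the composite key (rank, name), instead of A's four separate filter-and-sort passes concatenated.
import Mathlib
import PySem

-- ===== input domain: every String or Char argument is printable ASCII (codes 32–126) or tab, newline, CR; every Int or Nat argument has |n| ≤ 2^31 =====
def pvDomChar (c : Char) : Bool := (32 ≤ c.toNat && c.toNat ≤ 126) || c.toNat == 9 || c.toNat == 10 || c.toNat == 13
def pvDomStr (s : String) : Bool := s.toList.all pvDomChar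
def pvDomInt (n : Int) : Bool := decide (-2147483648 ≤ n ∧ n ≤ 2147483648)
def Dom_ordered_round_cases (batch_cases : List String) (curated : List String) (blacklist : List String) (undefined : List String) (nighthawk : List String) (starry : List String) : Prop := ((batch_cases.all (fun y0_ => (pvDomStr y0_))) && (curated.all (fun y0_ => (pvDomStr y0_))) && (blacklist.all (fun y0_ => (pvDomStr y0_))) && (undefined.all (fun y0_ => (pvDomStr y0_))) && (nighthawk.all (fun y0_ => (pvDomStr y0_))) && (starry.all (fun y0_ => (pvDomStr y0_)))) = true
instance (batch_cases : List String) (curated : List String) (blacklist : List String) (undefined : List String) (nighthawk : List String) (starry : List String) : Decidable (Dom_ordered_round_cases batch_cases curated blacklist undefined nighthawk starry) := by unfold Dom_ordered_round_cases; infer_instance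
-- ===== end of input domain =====

-- ===== PORT A =====
-- A: four filter+sort passes over the frontier, concatenated; B: one keyed sort of the frontier
-- by the composite key (category rank, name) — no buckets (objective: alternative decomposition).
def ordered_round_cases (batch_cases : List String) (curated : List String) (blacklist : List String) (undefined : List String) (nighthawk : List String) (starry : List String) : List String :=
  let frontier := PySem.Set.inter (PySem.Set.ofList batch_cases)
    (PySem.Set.diff (PySem.Set.diff
      (PySem.Set.union (PySem.Set.union (PySem.Set.ofList undefined) nighthawk) starry)
      curated) blacklist)
  let both := PySem.List.sorted (frontier.filter (fun c => undefined.contains c && nighthawk.contains c)) (fun x => x) false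
  let nighthawk_only := PySem.List.sorted (frontier.filter (fun c => nighthawk.contains c && !undefined.contains c)) (fun x => x) false
  let undefined_only := PySem.List.sorted (frontier.filter (fun c => undefined.contains c && !nighthawk.contains c)) (fun x => x) false
  let starry_only := PySem.List.sorted (frontier.filter (fun c => starry.contains c && !undefined.contains c && !nighthawk.contains c)) (fun x => x) false
  both ++ nighthawk_only ++ undefined_only ++ starry_only

-- ===== PORT B =====
-- Source B's rank(case): the category number of a case (0 both, 1 nighthawk only, 2 undefined only, 3 rest)
def rankOf (undefined nighthawk : List String) (c : String) : Nat :=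
  if undefined.contains c && nighthawk.contains c then 0
  else if nighthawk.contains c then 1
  else if undefined.contains c then 2
  else 3

def ordered_round_cases_alt (batch_cases : List String) (curated : List String) (blacklist : List String) (undefined : List String) (nighthawk : List String) (starry : List String) : List String :=
  let frontier := PySem.Set.inter (PySem.Set.ofList batch_cases)
    (PySem.Set.diff (PySem.Set.diff
      (PySem.Set.union (PySem.Set.union (PySem.Set.ofList undefined) nighthawk) starry)
      curated) blacklist)
  PySem.List.sorted2 frontier (fun c => rankOf undefined nighthawk c) (fun c => c) false

-- ===== PRECONDITION & SPEC =====
def Spec_ordered_round_cases (batch_cases : List String) (curated : List String) (blacklist : List String) (undefined : List String) (nighthawk : List String) (starry : List String) (out : List String) : Prop := out = ordered_round_cases_alt batch_cases curated blacklist undefined nighthawk starry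
instance (batch_cases : List String) (curated : List String) (blacklist : List String) (undefined : List String) (nighthawk : List String) (starry : List String) (out : List String) : Decidable (Spec_ordered_round_cases batch_cases curated blacklist undefined nighthawk starry out) := by unfold Spec_ordered_round_cases; infer_instance

-- ===== CLAIM (what is proved, stated in full; the proofs are below) =====
def Claim_equal_ordered_round_cases : Prop := ∀ (batch_cases : List String) (curated : List String) (blacklist : List String) (undefined : List String) (nighthawk : List String) (starry : List String), Dom_ordered_round_cases batch_cases curated blacklist undefined nighthawk starry → Spec_ordered_round_cases batch_cases curated blacklist undefined nighthawk starry (ordered_round_cases batch_cases curated blacklist undefined nighthawk starry)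

-- ===== LEMMAS AND PROOFS =====

-- sorted2 with keys (f, id) is sorted by the lexicographic composite key
theorem sorted2_eq_sorted_lexkey (xs : List String) (f : String → Nat) :
    PySem.List.sorted2 xs f (fun c => c) false
      = PySem.List.sorted xs (fun c => toLex (f c, c)) false := by
  rw [PySem.List.sorted_eq_foldl_insertBy]
  show List.foldl (fun acc x => PySem.List.insertBy (fun a b => decide (f a < f b) || !decide (f b < f a) && decide (a < b)) x acc) [] xs = _
  have hbe : (fun (a b : String) => decide (f a < f b) || !decide (f b < f a) && decide (a < b))
      = fun a b => decide (toLex (f a, a) < toLex (f b, b)) := by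
    funext a b
    by_cases h1 : f a < f b
    · simp [h1, Prod.Lex.toLex_lt_toLex]
    · by_cases h2 : f b < f a
      · simp [h1, h2, Prod.Lex.toLex_lt_toLex]; omega
      · have h3 : f a = f b := by omega
        simp [h3, Prod.Lex.toLex_lt_toLex]
  rw [hbe]

-- the four rank-classes of a list, concatenated in rank order, are a permutation of it
theorem partition4_perm (f : String → Nat) (s : List String) (hf : ∀ x ∈ s, f x ≤ 3) :
    (s.filter (fun c => f c == 0) ++ (s.filter (fun c => f c == 1)
      ++ (s.filter (fun c => f c == 2) ++ s.filter (fun c => f c == 3)))).Perm s := by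
  induction s with
  | nil => simp
  | cons a t ih =>
    have hft : ∀ x ∈ t, f x ≤ 3 := fun x hx => hf x (List.mem_cons_of_mem _ hx)
    have ih' := ih hft
    have ha : f a = 0 ∨ f a = 1 ∨ f a = 2 ∨ f a = 3 := by
      have := hf a (List.mem_cons_self)
      omega
    rcases ha with h | h | h | h <;> simp only [List.filter_cons, h] <;> norm_num
    · exact ih'
    · exact List.perm_middle.trans (ih'.cons a)
    · exact (List.perm_middle.append_left _).trans (List.perm_middle.trans (ih'.cons a))
    · exact ((List.perm_middle.append_left _).append_left _).trans
        ((List.perm_middle.append_left _).trans (List.perm_middle.trans (ih'.cons a)))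

-- sorting a filtered Nodup list = filtering the sorted list
theorem sorted_filter_comm (p : String → Bool) (l : List String) (hnd : l.Nodup) :
    PySem.List.sorted (l.filter p) (fun x => x) false
      = (PySem.List.sorted l (fun x => x) false).filter p := by
  apply PySem.List.sorted_eq_of_perm_of_pairwise_lt
  · exact (PySem.List.sorted_perm l (fun x => x) false).filter p
  · have hle : (PySem.List.sorted l (fun x => x) false).Pairwise (fun a b : String => a ≤ b) :=
      PySem.List.sorted_pairwise l (fun x => x)
    have hnd' : (PySem.List.sorted l (fun x => x) false).Nodup :=
      (PySem.List.sorted_perm l (fun x => x) false).nodup_iff.mpr hnd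
    have hlt : (PySem.List.sorted l (fun x => x) false).Pairwise (fun a b : String => a < b) :=
      (hle.and hnd').imp (fun h => lt_of_le_of_ne h.1 h.2)
    exact hlt.sublist List.filter_sublist

-- ===== VERDICT (by name: the statement is the Claim_ definition above) =====
theorem ordered_round_cases_spec : Claim_equal_ordered_round_cases := by
  intro batch_cases curated blacklist undefined nighthawk starry _
  unfold Spec_ordered_round_cases ordered_round_cases ordered_round_cases_alt
  set frontier := PySem.Set.inter (PySem.Set.ofList batch_cases)
    (PySem.Set.diff (PySem.Set.diff
      (PySem.Set.union (PySem.Set.union (PySem.Set.ofList undefined) nighthawk) starry)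
      curated) blacklist) with hfr
  have hnd : frontier.Nodup := PySem.Set.nodup_inter _ _ (PySem.Set.nodup_ofList batch_cases)
  dsimp only
  rw [sorted_filter_comm _ _ hnd, sorted_filter_comm _ _ hnd, sorted_filter_comm _ _ hnd,
      sorted_filter_comm _ _ hnd, sorted2_eq_sorted_lexkey]
  set s := PySem.List.sorted frontier (fun x => x) false with hs
  set f := rankOf undefined nighthawk with hf
  -- strict order on s
  have hslt : s.Pairwise (fun a b : String => a < b) := by
    have hle : s.Pairwise (fun a b : String => a ≤ b) :=
      PySem.List.sorted_pairwise frontier (fun x => x)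
    have hnd' : s.Nodup := (PySem.List.sorted_perm frontier (fun x => x) false).nodup_iff.mpr hnd
    exact (hle.and hnd').imp (fun h => lt_of_le_of_ne h.1 h.2)
  -- A's four filter predicates are the rank classes (the last one on frontier members)
  have hp0 : s.filter (fun c => undefined.contains c && nighthawk.contains c)
      = s.filter (fun c => f c == 0) := by
    apply List.filter_congr; intro c _
    simp only [hf, rankOf]; split_ifs <;> simp_all
  have hp1 : s.filter (fun c => nighthawk.contains c && !undefined.contains c)
      = s.filter (fun c => f c == 1) := by
    apply List.filter_congr; intro c _
    simp only [hf, rankOf]; split_ifs <;> simp_all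
  have hp2 : s.filter (fun c => undefined.contains c && !nighthawk.contains c)
      = s.filter (fun c => f c == 2) := by
    apply List.filter_congr; intro c _
    simp only [hf, rankOf]; split_ifs <;> simp_all
  have hp3 : s.filter (fun c => starry.contains c && !undefined.contains c && !nighthawk.contains c)
      = s.filter (fun c => f c == 3) := by
    apply List.filter_congr; intro c hc
    have hcf : c ∈ frontier := (PySem.List.mem_sorted _ _ _ _).mp hc
    simp only [hf, rankOf]
    by_cases hu : c ∈ undefined <;> by_cases hn : c ∈ nighthawk <;> simp [hu, hn]
    -- c not in undefined, not in nighthawk ⇒ c ∈ starry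
    have h1 : c ∈ PySem.Set.union (PySem.Set.union (PySem.Set.ofList undefined) nighthawk) starry := by
      have := (PySem.Set.mem_inter _ _ _).mp hcf
      have := (PySem.Set.mem_diff _ _ _).mp this.2
      exact ((PySem.Set.mem_diff _ _ _).mp this.1).1
    rcases (PySem.Set.mem_union _ _ _).mp h1 with h | h
    · rcases (PySem.Set.mem_union _ _ _).mp h with h | h
      · exact absurd ((PySem.Set.mem_ofList _ _).mp h) hu
      · exact absurd h hn
    · exact h
  rw [hp0, hp1, hp2, hp3]
  -- B's sort equals the rank-class concatenation: name the sorted order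
  symm
  apply PySem.List.sorted_eq_of_perm_of_pairwise_lt
  · have hle3 : ∀ x ∈ s, f x ≤ 3 := by
      intro x _; simp only [hf, rankOf]; split_ifs <;> omega
    simp only [List.append_assoc]
    exact (partition4_perm f s hle3).trans (PySem.List.sorted_perm frontier (fun x => x) false)
  · -- pairwise strict lex: within a class by name, across classes by rank
    have hin : ∀ i : Nat, (s.filter (fun c => f c == i)).Pairwise
        (fun a b => toLex (f a, a) < toLex (f b, b)) := by
      intro i
      have := hslt.sublist (List.filter_sublist (p := fun c => f c == i))
      refine this.imp_of_mem ?_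
      intro a b hma hmb hab
      have hfa : f a = i := by simpa using (List.mem_filter.mp hma).2
      have hfb : f b = i := by simpa using (List.mem_filter.mp hmb).2
      exact Prod.Lex.toLex_lt_toLex.mpr (Or.inr ⟨by omega, hab⟩)
    have hcross : ∀ i j : Nat, i < j → ∀ a ∈ s.filter (fun c => f c == i),
        ∀ b ∈ s.filter (fun c => f c == j), toLex (f a, a) < toLex (f b, b) := by
      intro i j hij a hma b hmb
      have hfa : f a = i := by simpa using (List.mem_filter.mp hma).2
      have hfb : f b = j := by simpa using (List.mem_filter.mp hmb).2
      exact Prod.Lex.toLex_lt_toLex.mpr (Or.inl (by omega))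
    simp only [List.append_assoc, List.pairwise_append]
    refine ⟨hin 0, ⟨hin 1, ⟨hin 2, hin 3, fun a ha b hb => hcross 2 3 (by omega) a ha b hb⟩, ?_⟩, ?_⟩
    · intro a ha b hb
      rcases List.mem_append.mp hb with hb | hb
      · exact hcross 1 2 (by omega) a ha b hb
      · exact hcross 1 3 (by omega) a ha b hb
    · intro a ha b hb
      rcases List.mem_append.mp hb with hb | hb
      · exact hcross 0 1 (by omega) a ha b hb
      rcases List.mem_append.mp hb with hb | hb
      · exact hcross 0 2 (by omega) a ha b hb
      · exact hcross 0 3 (by omega) a ha b hb
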